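-- pv_equiv track=rewrite | github.com/equestrian2296/innovact2025_bhejafry | backend/services/roadmap_generator.py | _determine_difficulty_progression
-- ===== SOURCE A (Python) =====
-- from typing import Dict, List, Any
--
-- def _determine_difficulty_progression(roadmap: List[Dict[str, Any]]) -> str:
--     """Determine the difficulty progression pattern"""
--     if not roadmap:
--         return "linear"
--
--     # Analyze difficulty progression
--     difficulties = []
--     for week in roadmap:
--         topic = week["topic"].lower()
--         if any(word in topic for word in ['basic', 'introduction']):
--             difficulties.append(1)
--         elif any(word in topic for word in ['advanced', 'complex']):
--             difficulties.append(3)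
--         else:
--             difficulties.append(2)
--
--     # Determine progression pattern
--     if len(difficulties) < 2:
--         return "linear"
--
--     # Check if difficulty increases over time
--     increasing = all(difficulties[i] <= difficulties[i+1] for i in range(len(difficulties)-1))
--
--     if increasing:
--         return "progressive"
--     else:
--         return "mixed"
-- ===== SOURCE B (Python) =====
-- def _determine_difficulty_progression(roadmap):
--     """Two-flag automaton for the regular language basic* intermediate* advanced*:
--     no scores, no comparisons; returns 'mixed' the moment a lower category
--     follows a higher one."""
--     if len(roadmap) < 2:
--         return "linear"
--     seen_mid = False
--     seen_adv = False
--     for week in roadmap: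
--         topic = week["topic"].lower()
--         if 'basic' in topic or 'introduction' in topic:
--             if seen_mid or seen_adv:
--                 return "mixed"
--         elif 'advanced' in topic or 'complex' in topic:
--             seen_adv = True
--         else:
--             if seen_adv:
--                 return "mixed"
--             seen_mid = True
--     return "progressive"
-- ===== Notes on version B (the rewrite author's own statement) =====
-- stated objective: alternative
-- what changed: Replaces A's materialized score list plus all()-over-adjacent-pairs comparison with a two-boolean finite automaton that accepts exactly the category language basic* intermediate* advanced*: no score values, no numeric comparisons, no list, and an early return of 'mixed' at the first out-of-order week.
import Mathlib
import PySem

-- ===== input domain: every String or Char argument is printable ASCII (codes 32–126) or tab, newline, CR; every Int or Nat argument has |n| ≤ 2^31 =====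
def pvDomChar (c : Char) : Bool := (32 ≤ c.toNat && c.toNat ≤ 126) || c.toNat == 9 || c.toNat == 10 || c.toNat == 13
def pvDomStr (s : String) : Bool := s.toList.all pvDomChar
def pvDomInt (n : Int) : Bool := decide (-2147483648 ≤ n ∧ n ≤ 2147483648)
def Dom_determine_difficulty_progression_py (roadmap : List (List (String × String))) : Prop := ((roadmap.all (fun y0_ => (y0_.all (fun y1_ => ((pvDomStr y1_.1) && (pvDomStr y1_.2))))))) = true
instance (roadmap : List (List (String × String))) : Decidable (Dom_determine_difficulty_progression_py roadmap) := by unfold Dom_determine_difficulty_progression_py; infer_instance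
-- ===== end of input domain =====

-- B replaces A's score list + adjacent-pair scan with a two-flag automaton for basic* intermediate* advanced* (early 'mixed' exit); equal on Pre_ (every week has a "topic" key).


-- ===== PORT A =====
-- week["topic"].lower(); total here via getD "" — Pre_ excludes the missing-key (KeyError) inputs,
-- so the default is never claimed about.
def pvTopicLower (week : List (String × String)) : String :=
  PySem.Str.lower ((PySem.Dict.mk week).getD "topic" "")

-- A's keyword cascade producing a score (topic = pvTopicLower week inlined)
def pvScoreA (week : List (String × String)) : Int :=
  if PySem.Str.isIn "basic" (pvTopicLower week) || PySem.Str.isIn "introduction" (pvTopicLower week) then 1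
  else if PySem.Str.isIn "advanced" (pvTopicLower week) || PySem.Str.isIn "complex" (pvTopicLower week) then 3
  else 2

def determine_difficulty_progression_py (roadmap : List (List (String × String))) : String :=
  if roadmap = [] then "linear"
  else
    let difficulties := roadmap.foldl (fun acc week => acc ++ [pvScoreA week]) []
    if difficulties.length < 2 then "linear"
    else
      let increasing := (List.range (difficulties.length - 1)).all
        (fun i => decide (difficulties.getD i 0 ≤ difficulties.getD (i + 1) 0))
      if increasing then "progressive" else "mixed"

-- ===== PORT B =====
-- Source B's for-loop: two flags, early return "mixed"
def pvRunB : List (List (String × String)) → Bool → Bool → String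
  | [], _, _ => "progressive"
  | week :: rest, seenMid, seenAdv =>
    let topic := pvTopicLower week
    if PySem.Str.isIn "basic" topic || PySem.Str.isIn "introduction" topic then
      if seenMid || seenAdv then "mixed" else pvRunB rest seenMid seenAdv
    else if PySem.Str.isIn "advanced" topic || PySem.Str.isIn "complex" topic then
      pvRunB rest seenMid true
    else if seenAdv then "mixed" else pvRunB rest true seenAdv

def determine_difficulty_progression_py_alt (roadmap : List (List (String × String))) : String :=
  if roadmap.length < 2 then "linear" else pvRunB roadmap false false

-- ===== PRECONDITION & SPEC =====
-- Pre_ excludes exactly the inputs where A raises KeyError: a week without a "topic" key.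
def Pre_determine_difficulty_progression_py (roadmap : List (List (String × String))) : Prop :=
  ∀ week ∈ roadmap, (PySem.Dict.mk week).contains "topic" = true
instance (roadmap : List (List (String × String))) : Decidable (Pre_determine_difficulty_progression_py roadmap) := by unfold Pre_determine_difficulty_progression_py; infer_instance
def pvWitness_determine_difficulty_progression_py : (List (List (String × String))) :=
  [[("topic", "Basics of X")], [("topic", "Advanced Y")]]

def Spec_determine_difficulty_progression_py (roadmap : List (List (String × String))) (out : String) : Prop := out = determine_difficulty_progression_py_alt roadmap
instance (roadmap : List (List (String × String))) (out : String) : Decidable (Spec_determine_difficulty_progression_py roadmap out) := by unfold Spec_determine_difficulty_progression_py; infer_instance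

-- ===== CLAIM (what is proved, stated in full; the proofs are below) =====
def Claim_equal_determine_difficulty_progression_py : Prop := ∀ (roadmap : List (List (String × String))), Dom_determine_difficulty_progression_py roadmap → Pre_determine_difficulty_progression_py roadmap → Spec_determine_difficulty_progression_py roadmap (determine_difficulty_progression_py roadmap)

-- ===== LEMMAS AND PROOFS =====

-- pairwise-adjacent ≤ as a recursive Bool (A's "increasing" reduces to it)
def pvPW : List Int → Bool
  | [] => true
  | [_] => true
  | a :: b :: r => decide (a ≤ b) && pvPW (b :: r)

-- the numeric reading of B's automaton state
def pvM (seenMid seenAdv : Bool) : Int :=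
  if seenAdv then 3 else if seenMid then 2 else 1

theorem foldl_scores (l : List (List (String × String))) (acc : List Int) :
    l.foldl (fun acc week => acc ++ [pvScoreA week]) acc = acc ++ l.map pvScoreA := by
  induction l generalizing acc with
  | nil => simp
  | cons w r ih => simp [List.foldl, ih]

theorem rangeAll_eq_pvPW (ds : List Int) :
    (List.range (ds.length - 1)).all
      (fun i => decide (ds.getD i 0 ≤ ds.getD (i + 1) 0)) = pvPW ds := by
  induction ds with
  | nil => simp [pvPW]
  | cons a t ih =>
    cases t with
    | nil => simp [pvPW]
    | cons b r =>
      have h := ih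
      simp only [List.length_cons, Nat.add_sub_cancel] at h ⊢
      rw [List.range_succ_eq_map]
      simp only [List.all_cons, List.all_map, Function.comp_def, Nat.succ_eq_add_one,
        List.getD_cons_succ, List.getD_cons_zero]
      simp only [List.getD_cons_succ] at h
      rw [pvPW, ← h]

theorem pvPW_cons2 (a b : Int) (r : List Int) :
    pvPW (a :: b :: r) = (decide (a ≤ b) && pvPW (b :: r)) := rfl

theorem score_one_le (w : List (String × String)) : 1 ≤ pvScoreA w := by
  unfold pvScoreA; split_ifs <;> omega

-- B's automaton run = pairwise check seeded with the state's numeric reading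
theorem runB_eq_pvPW (ws : List (List (String × String))) (s2 s3 : Bool) :
    pvRunB ws s2 s3 = (if pvPW (pvM s2 s3 :: ws.map pvScoreA) then "progressive" else "mixed") := by
  induction ws generalizing s2 s3 with
  | nil => simp [pvRunB, pvPW]
  | cons w r ih =>
    have hmap : (w :: r).map pvScoreA = pvScoreA w :: r.map pvScoreA := rfl
    unfold pvRunB
    rw [hmap]
    by_cases h1 : (PySem.Str.isIn "basic" (pvTopicLower w) || PySem.Str.isIn "introduction" (pvTopicLower w)) = true
    · have hs : pvScoreA w = 1 := by unfold pvScoreA; rw [h1]; rfl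
      rw [hs]
      simp only [h1, if_true]
      cases s2 <;> cases s3 <;> simp [pvM, pvPW_cons2, ih]
    · simp only [h1, Bool.false_eq_true, if_false]
      by_cases h2 : (PySem.Str.isIn "advanced" (pvTopicLower w) || PySem.Str.isIn "complex" (pvTopicLower w)) = true
      · have hs : pvScoreA w = 3 := by
          simp only [Bool.not_eq_true] at h1
          unfold pvScoreA; rw [h1, h2]; rfl
        rw [hs]
        simp only [h2, if_true]
        cases s2 <;> cases s3 <;> simp [pvM, pvPW_cons2, ih]
      · have hs : pvScoreA w = 2 := by
          simp only [Bool.not_eq_true] at h1 h2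
          unfold pvScoreA; rw [h1, h2]; rfl
        rw [hs]
        simp only [h2, Bool.false_eq_true, if_false]
        cases s2 <;> cases s3 <;> simp [pvM, pvPW_cons2, ih]

-- ===== VERDICT (by name: the statement is the Claim_ definition above) =====
theorem determine_difficulty_progression_py_spec : Claim_equal_determine_difficulty_progression_py := by
  intro roadmap _ _
  unfold Spec_determine_difficulty_progression_py
  unfold determine_difficulty_progression_py determine_difficulty_progression_py_alt
  match roadmap with
  | [] => simp
  | [w] => simp
  | w1 :: w2 :: rest =>
    have hne : (w1 :: w2 :: rest : List (List (String × String))) ≠ [] := by simp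
    have hlen : ¬ (w1 :: w2 :: rest : List (List (String × String))).length < 2 := by
      simp
    simp only [hne, if_false, foldl_scores, List.nil_append, rangeAll_eq_pvPW]
    have hlenm : ¬ ((w1 :: w2 :: rest).map pvScoreA).length < 2 := by
      simp
    rw [if_neg hlenm, if_neg hlen, runB_eq_pvPW]
    have h1 : pvM false false = 1 := rfl
    rw [h1]
    show (if pvPW (pvScoreA w1 :: (w2 :: rest).map pvScoreA) then _ else _)
       = (if pvPW (1 :: pvScoreA w1 :: (w2 :: rest).map pvScoreA) then _ else _)
    have : pvPW (1 :: pvScoreA w1 :: (w2 :: rest).map pvScoreA)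
         = pvPW (pvScoreA w1 :: (w2 :: rest).map pvScoreA) := by
      rw [pvPW_cons2]
      simp [score_one_le w1]
    rw [this]
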